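-- pv_equiv track=rewrite | github.com/Farhad0111/5x5TicTacTeoBackpropagationAndMiniMaxAlgorithmCompaire | MiniMax Algorithm/FinalTicTacTeo.py | is_winning_diagonal
-- ===== SOURCE A (Python) =====
-- from typing import List, Tuple, Optional
--
-- BOARD_SIZE = 5
--
-- WIN_LENGTH = 3
--
-- def has_consecutive_symbols(line: List[str], player: str, length: int = WIN_LENGTH) -> bool:
--     """Checks if a line contains the required consecutive symbols."""
--     consecutive = 0
--     for cell in line:
--         if cell == player:
--             consecutive += 1
--             if consecutive >= length:
--                 return True
--         else:
--             consecutive = 0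
--     return False
--
-- def is_winning_diagonal(board: List[List[str]], player: str) -> bool:
--     """Checks all possible diagonals for a winning combination."""
--     # Check all diagonals (top-left to bottom-right)
--     for start_row in range(BOARD_SIZE - WIN_LENGTH + 1):
--         for start_col in range(BOARD_SIZE - WIN_LENGTH + 1):
--             diagonal = [board[start_row + i][start_col + i] for i in range(BOARD_SIZE - max(start_row, start_col))]
--             if has_consecutive_symbols(diagonal, player):
--                 return True
--
--     # Check all anti-diagonals (top-right to bottom-left)
--     for start_row in range(BOARD_SIZE - WIN_LENGTH + 1):
--         for start_col in range(WIN_LENGTH - 1, BOARD_SIZE):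
--             diagonal = [board[start_row + i][start_col - i] for i in range(min(BOARD_SIZE - start_row, start_col + 1))]
--             if has_consecutive_symbols(diagonal, player):
--                 return True
--
--     return False
-- ===== SOURCE B (Python) =====
-- from typing import List
--
-- BOARD_SIZE = 5
-- WIN_LENGTH = 3
--
-- def is_winning_diagonal(board: List[List[str]], player: str) -> bool:
--     """Slide a fixed WIN_LENGTH window over every diagonal position directly."""
--     for r in range(BOARD_SIZE - WIN_LENGTH + 1):
--         for c in range(BOARD_SIZE - WIN_LENGTH + 1):
--             if all(board[r + i][c + i] == player for i in range(WIN_LENGTH)):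
--                 return True
--         for c in range(WIN_LENGTH - 1, BOARD_SIZE):
--             if all(board[r + i][c - i] == player for i in range(WIN_LENGTH)):
--                 return True
--     return False
-- ===== Notes on version B (the rewrite author's own statement) =====
-- stated objective: simpler
-- what changed: B drops the has_consecutive_symbols helper and the overlapping variable-length diagonal extraction entirely: it slides a fixed WIN_LENGTH window directly over every diagonal/anti-diagonal start position and tests each window with all(), returning True on the first full window.
import Mathlib
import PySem

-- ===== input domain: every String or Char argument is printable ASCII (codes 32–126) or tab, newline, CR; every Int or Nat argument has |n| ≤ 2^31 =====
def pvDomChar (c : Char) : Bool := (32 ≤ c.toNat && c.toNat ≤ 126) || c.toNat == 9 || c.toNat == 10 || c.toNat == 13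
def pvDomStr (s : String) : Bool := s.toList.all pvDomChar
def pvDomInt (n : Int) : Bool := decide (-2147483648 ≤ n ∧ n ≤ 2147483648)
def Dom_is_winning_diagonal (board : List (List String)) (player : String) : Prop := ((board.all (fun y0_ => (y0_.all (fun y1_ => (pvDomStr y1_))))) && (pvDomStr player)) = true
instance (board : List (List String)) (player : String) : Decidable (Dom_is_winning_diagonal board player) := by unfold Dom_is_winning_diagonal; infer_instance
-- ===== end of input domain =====

-- B replaces A's overlapping variable-length diagonal lists + consecutive-counter helper by
-- direct fixed-length (WIN_LENGTH = 3) window tests at each diagonal start position (simpler).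

-- ===== PORT A =====
-- board[r][c]: both indexings are in range for every input admitted by Pre_ (indices 0..4 into
-- lists of length ≥ 5), so the total pyGetD form is exact there; outside Pre_ Python raises IndexError.
def pvCell (board : List (List String)) (r c : Int) : String :=
  PySem.List.pyGetD (PySem.List.pyGetD board r []) c ""

-- the loop body of has_consecutive_symbols, with its running `consecutive` counter and early return
def pvHasConsecutive (line : List String) (player : String) (length : Int) (consecutive : Int) : Bool :=
  match line with
  | [] => false
  | cell :: rest =>
    if cell == player then
      if consecutive + 1 ≥ length then true
      else pvHasConsecutive rest player length (consecutive + 1)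
    else pvHasConsecutive rest player length 0

def has_consecutive_symbols (line : List String) (player : String) (length : Int) : Bool :=
  pvHasConsecutive line player length 0

def is_winning_diagonal (board : List (List String)) (player : String) : Bool :=
  -- BOARD_SIZE = 5, WIN_LENGTH = 3
  ((PySem.List.pyRange 0 (5 - 3 + 1) 1).any (fun start_row =>
    (PySem.List.pyRange 0 (5 - 3 + 1) 1).any (fun start_col =>
      has_consecutive_symbols
        ((PySem.List.pyRange 0 (5 - max start_row start_col) 1).map
          (fun i => pvCell board (start_row + i) (start_col + i)))
        player 3)))
  ||
  ((PySem.List.pyRange 0 (5 - 3 + 1) 1).any (fun start_row =>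
    (PySem.List.pyRange (3 - 1) 5 1).any (fun start_col =>
      has_consecutive_symbols
        ((PySem.List.pyRange 0 (min (5 - start_row) (start_col + 1)) 1).map
          (fun i => pvCell board (start_row + i) (start_col - i)))
        player 3)))

-- ===== PORT B =====
def is_winning_diagonal_alt (board : List (List String)) (player : String) : Bool :=
  -- BOARD_SIZE = 5, WIN_LENGTH = 3
  (PySem.List.pyRange 0 (5 - 3 + 1) 1).any (fun r =>
    ((PySem.List.pyRange 0 (5 - 3 + 1) 1).any (fun c =>
      (PySem.List.pyRange 0 3 1).all (fun i => pvCell board (r + i) (c + i) == player)))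
    ||
    ((PySem.List.pyRange (3 - 1) 5 1).any (fun c =>
      (PySem.List.pyRange 0 3 1).all (fun i => pvCell board (r + i) (c - i) == player))))

-- ===== PRECONDITION & SPEC =====
-- Exactly where A returns: it indexes board[0..4][0..4], so Python raises IndexError iff the
-- board has fewer than 5 rows or one of the first 5 rows has fewer than 5 cells.
def Pre_is_winning_diagonal (board : List (List String)) (player : String) : Prop :=
  5 ≤ board.length ∧ ∀ row ∈ board.take 5, 5 ≤ row.length
instance (board : List (List String)) (player : String) : Decidable (Pre_is_winning_diagonal board player) := by unfold Pre_is_winning_diagonal; infer_instance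

def pvWitness_is_winning_diagonal : List (List String) × String :=
  ([["X","O","X","O","X"],["O","X","O","X","O"],["X","O","X","O","X"],
    ["O","X","O","X","O"],["X","O","X","O","X"]], "X")

def Spec_is_winning_diagonal (board : List (List String)) (player : String) (out : Bool) : Prop := out = is_winning_diagonal_alt board player
instance (board : List (List String)) (player : String) (out : Bool) : Decidable (Spec_is_winning_diagonal board player out) := by unfold Spec_is_winning_diagonal; infer_instance

-- ===== CLAIM (what is proved, stated in full; the proofs are below) =====
def Claim_equal_is_winning_diagonal : Prop := ∀ (board : List (List String)) (player : String), Dom_is_winning_diagonal board player → Pre_is_winning_diagonal board player → Spec_is_winning_diagonal board player (is_winning_diagonal board player)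

-- ===== LEMMAS AND PROOFS =====

-- A's consecutive-counter scan on a 3/4/5-cell line equals the disjunction of its 3-windows.
theorem pv_hc3 (x1 x2 x3 p : String) :
    pvHasConsecutive [x1, x2, x3] p 3 0 = (x1 == p && (x2 == p && x3 == p)) := by
  by_cases h1 : x1 = p <;> by_cases h2 : x2 = p <;> by_cases h3 : x3 = p <;>
    simp [pvHasConsecutive, h1, h2, h3]

theorem pv_hc4 (x1 x2 x3 x4 p : String) :
    pvHasConsecutive [x1, x2, x3, x4] p 3 0
      = (x1 == p && (x2 == p && x3 == p) || x2 == p && (x3 == p && x4 == p)) := by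
  by_cases h1 : x1 = p <;> by_cases h2 : x2 = p <;> by_cases h3 : x3 = p <;> by_cases h4 : x4 = p <;>
    simp [pvHasConsecutive, h1, h2, h3, h4]

theorem pv_hc5 (x1 x2 x3 x4 x5 p : String) :
    pvHasConsecutive [x1, x2, x3, x4, x5] p 3 0
      = (x1 == p && (x2 == p && x3 == p) || x2 == p && (x3 == p && x4 == p)
          || x3 == p && (x4 == p && x5 == p)) := by
  by_cases h1 : x1 = p <;> by_cases h2 : x2 = p <;> by_cases h3 : x3 = p <;>
    by_cases h4 : x4 = p <;> by_cases h5 : x5 = p <;>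
    simp [pvHasConsecutive, h1, h2, h3, h4, h5]

-- the equality on a fully destructured board (first 5 cells of the first 5 rows explicit)
set_option maxHeartbeats 4000000 in
theorem pv_core
    (a b c d e f g h i j k l m n o p q r s t u v w x y : String)
    (t0 t1 t2 t3 t4 : List String) (rest : List (List String)) (player : String) :
    is_winning_diagonal
      ((a::b::c::d::e::t0) :: (f::g::h::i::j::t1) :: (k::l::m::n::o::t2) ::
       (p::q::r::s::t::t3) :: (u::v::w::x::y::t4) :: rest) player
  = is_winning_diagonal_alt
      ((a::b::c::d::e::t0) :: (f::g::h::i::j::t1) :: (k::l::m::n::o::t2) ::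
       (p::q::r::s::t::t3) :: (u::v::w::x::y::t4) :: rest) player := by
  norm_num [is_winning_diagonal, is_winning_diagonal_alt, has_consecutive_symbols,
    PySem.List.pyRange_one, List.range_succ, pvCell,
    show ((3:Int).toNat = 3) from rfl, show ((4:Int).toNat = 4) from rfl,
    show ((5:Int).toNat = 5) from rfl,
    List.any_cons, List.all_cons, List.any_nil, List.all_nil, Function.comp,
    PySem.List.pyGetD_ofNat', PySem.List.pyGetD_zero_cons,
    pv_hc3, pv_hc4, pv_hc5]
  simp only [Bool.or_assoc]
  simp only [Bool.or_comm, Bool.or_left_comm, Bool.or_self_left, Bool.or_self]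

-- ===== VERDICT (by name: the statement is the Claim_ definition above) =====
theorem is_winning_diagonal_spec : Claim_equal_is_winning_diagonal := by
  intro board player _ hpre
  obtain ⟨hlen, hrows⟩ := hpre
  unfold Spec_is_winning_diagonal
  rcases board with _ | ⟨r0, board⟩; · simp at hlen
  rcases board with _ | ⟨r1, board⟩; · simp at hlen
  rcases board with _ | ⟨r2, board⟩; · simp at hlen
  rcases board with _ | ⟨r3, board⟩; · simp at hlen
  rcases board with _ | ⟨r4, rest⟩; · simp at hlen
  have h0 : 5 ≤ r0.length := hrows r0 (by simp)
  have h1 : 5 ≤ r1.length := hrows r1 (by simp)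
  have h2 : 5 ≤ r2.length := hrows r2 (by simp)
  have h3 : 5 ≤ r3.length := hrows r3 (by simp)
  have h4 : 5 ≤ r4.length := hrows r4 (by simp)
  rcases r0 with _|⟨a,_|⟨b,_|⟨c,_|⟨d,_|⟨e,t0⟩⟩⟩⟩⟩ <;> simp at h0
  rcases r1 with _|⟨f,_|⟨g,_|⟨h,_|⟨i,_|⟨j,t1⟩⟩⟩⟩⟩ <;> simp at h1
  rcases r2 with _|⟨k,_|⟨l,_|⟨m,_|⟨n,_|⟨o,t2⟩⟩⟩⟩⟩ <;> simp at h2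
  rcases r3 with _|⟨p,_|⟨q,_|⟨r,_|⟨s,_|⟨t,t3⟩⟩⟩⟩⟩ <;> simp at h3
  rcases r4 with _|⟨u,_|⟨v,_|⟨w,_|⟨x,_|⟨y,t4⟩⟩⟩⟩⟩ <;> simp at h4
  exact pv_core a b c d e f g h i j k l m n o p q r s t u v w x y t0 t1 t2 t3 t4 rest player
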